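-- pv_equiv track=rewrite | github.com/m17pratiksha/Coding_Practice | coding_practice_24_june_2021.py | migrationofbirds
-- ===== SOURCE A (Python) =====
-- def migrationofbirds(arr):
--     """
--     i expect this function should be able to analyse given array in following manner
--     1) compare numbers in given array
--     2) find numbers are repeating or not
--     2) if yes , check how many times number is getting repeated
--     3) find out smallest number amon those repeating numbers
--     """
--     same_type_birds = []
--
--     for i in range(len(arr)):
--         for j in range((i+1),len(arr)):
--
--             if arr[i] == arr[j]:
--                 same_type_birds.append(arr[i])
--
--     small_num = min(same_type_birds)
--
--     return small_num
-- ===== SOURCE B (Python) =====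
-- def migrationofbirds(arr):
--     s = sorted(arr)
--     for prev, cur in zip(s, s[1:]):
--         if prev == cur:
--             return prev
--     raise ValueError("min() arg is an empty sequence")
-- ===== Notes on version B (the rewrite author's own statement) =====
-- stated objective: faster
-- what changed: Replaces the O(n^2) all-pairs duplicate collection followed by min() with a sort of a copy and a single scan for the first adjacent equal pair, which is the smallest repeated value.
-- outside the precondition, e.g. on migrationofbirds([]): A raises ValueError, B raises ValueError; on migrationofbirds([1, 2]): A raises ValueError, B raises ValueError
import Mathlib
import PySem

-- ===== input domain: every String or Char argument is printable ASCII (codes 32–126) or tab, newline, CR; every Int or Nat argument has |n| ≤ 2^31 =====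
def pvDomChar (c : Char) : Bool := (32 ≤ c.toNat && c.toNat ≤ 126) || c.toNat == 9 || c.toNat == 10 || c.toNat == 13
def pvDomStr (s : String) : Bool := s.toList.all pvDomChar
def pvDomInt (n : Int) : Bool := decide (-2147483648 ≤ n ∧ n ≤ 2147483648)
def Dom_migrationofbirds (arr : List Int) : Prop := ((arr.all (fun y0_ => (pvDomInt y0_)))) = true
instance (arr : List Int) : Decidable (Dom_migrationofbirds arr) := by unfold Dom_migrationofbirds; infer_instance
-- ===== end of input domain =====

-- B replaces A's O(n^2) all-pairs duplicate collection followed by min() with a sort of a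
-- copy of arr and one scan for the first adjacent equal pair (neither version mutates arr).
-- Equivalence is claimed on Pre_ (arrays containing a repeated value); outside it both
-- Pythons raise ValueError.

-- ===== PORT A =====
def migrationofbirds (arr : List Int) : Int :=
  let n : Int := arr.length
  let same_type_birds : List Int :=
    (PySem.List.pyRange 0 n 1).foldl (fun acc i =>
      (PySem.List.pyRange (i + 1) n 1).foldl (fun acc2 j =>
        if PySem.List.pyGetD arr i 0 == PySem.List.pyGetD arr j 0 then
          acc2 ++ [PySem.List.pyGetD arr i 0]
        else acc2) acc) []
  -- min(same_type_birds): ValueError (= none) on an empty list, excluded by Pre_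
  (PySem.List.min? same_type_birds (fun x => x)).getD 0

-- ===== PORT B =====
def migrationofbirds_alt (arr : List Int) : Int :=
  let s := PySem.List.sorted arr (fun x => x) false
  -- for prev, cur in zip(s, s[1:]): return prev at the first pair with prev == cur
  match (s.zip s.tail).find? (fun p => p.1 == p.2) with
  | some p => p.1
  | none => 0   -- raise ValueError: unreachable under Pre_

-- ===== PRECONDITION & SPEC =====
-- Pre_ excludes arrays with no repeated value: there A's min([]) raises ValueError (and B raises too).
def Pre_migrationofbirds (arr : List Int) : Prop := ¬ arr.Nodup
instance (arr : List Int) : Decidable (Pre_migrationofbirds arr) := by unfold Pre_migrationofbirds; infer_instance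

def pvWitness_migrationofbirds : List Int := [3, 1, 3]

def Spec_migrationofbirds (arr : List Int) (out : Int) : Prop := out = migrationofbirds_alt arr
instance (arr : List Int) (out : Int) : Decidable (Spec_migrationofbirds arr out) := by unfold Spec_migrationofbirds; infer_instance

-- ===== CLAIM (what is proved, stated in full; the proofs are below) =====
def Claim_equal_migrationofbirds : Prop := ∀ (arr : List Int), Dom_migrationofbirds arr → Pre_migrationofbirds arr → Spec_migrationofbirds arr (migrationofbirds arr)

-- ===== LEMMAS AND PROOFS =====

-- two positions i < j holding equal entries give count ≥ 2
theorem two_le_count_of_indices (l : List Int) (i j : Nat) (hij : i < j) (hj : j < l.length)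
    (he : l[i] = l[j]) : 2 ≤ l.count l[i] := by
  have h1 : l[i] ∈ l.take (i+1) := by
    have : (l.take (i+1))[i]'(by simp; omega) = l[i] := List.getElem_take
    exact this ▸ List.getElem_mem _
  have h2 : l[i] ∈ l.drop (i+1) := by
    have : (l.drop (i+1))[j - (i+1)]'(by simp; omega) = l[j] := by
      rw [List.getElem_drop]; congr 1; omega
    rw [he]
    exact this ▸ List.getElem_mem _
  calc 2 ≤ (l.take (i+1)).count l[i] + (l.drop (i+1)).count l[i] := by
        have := List.count_pos_iff.mpr h1
        have := List.count_pos_iff.mpr h2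
        omega
    _ = l.count l[i] := by rw [← List.count_append, List.take_append_drop]

-- count ≥ 2 gives two positions i < j holding that value
theorem indices_of_two_le_count (l : List Int) (x : Int) (h : 2 ≤ l.count x) :
    ∃ i j : Nat, i < j ∧ j < l.length ∧ l[i]? = some x ∧ l[j]? = some x := by
  have hx : x ∈ l := List.count_pos_iff.mp (by omega)
  have hil : l.idxOf x < l.length := List.idxOf_lt_length_of_mem hx
  have hgi : l[l.idxOf x]? = some x := by
    rw [List.getElem?_eq_getElem hil, List.getElem_idxOf]
  have hsplit : l.count x = (l.take (l.idxOf x + 1)).count x + (l.drop (l.idxOf x + 1)).count x := by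
    rw [← List.count_append, List.take_append_drop]
  have htake : (l.take (l.idxOf x + 1)).count x ≤ 1 := by
    have h2 : l.take (l.idxOf x + 1) = l.take (l.idxOf x) ++ [x] := by
      rw [← List.take_concat_get' _ _ hil]
      simp [List.getElem_idxOf]
    have h3 : x ∉ l.take (l.idxOf x) := by
      rw [List.mem_take_iff_idxOf_lt hx]; omega
    rw [h2, List.count_append]
    simp [List.count_eq_zero_of_not_mem h3]
  have hdrop : 0 < (l.drop (l.idxOf x + 1)).count x := by omega
  have hxd : x ∈ l.drop (l.idxOf x + 1) := List.count_pos_iff.mp hdrop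
  obtain ⟨k, hk, hke⟩ := List.getElem_of_mem hxd
  have hk' : l.idxOf x + 1 + k < l.length := by simp at hk; omega
  refine ⟨l.idxOf x, l.idxOf x + 1 + k, by omega, hk', hgi, ?_⟩
  have h4 : (l.drop (l.idxOf x + 1))[k]'hk = l[l.idxOf x + 1 + k]'hk' := List.getElem_drop ..
  rw [List.getElem?_eq_getElem hk', ← h4, hke]

-- membership in A's collected list is exactly "appears at least twice in arr"
theorem mem_stb_iff (arr : List Int) (x : Int) :
    x ∈ (PySem.List.pyRange 0 (arr.length : Int) 1).foldl (fun acc i =>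
      (PySem.List.pyRange (i + 1) (arr.length : Int) 1).foldl (fun acc2 j =>
        if PySem.List.pyGetD arr i 0 == PySem.List.pyGetD arr j 0 then
          acc2 ++ [PySem.List.pyGetD arr i 0]
        else acc2) acc) ([] : List Int) ↔ 2 ≤ arr.count x := by
  have h1 := PySem.List.foldl_congr_mem' (PySem.List.pyRange 0 (arr.length : Int) 1)
    (fun acc i =>
      (PySem.List.pyRange (i + 1) (arr.length : Int) 1).foldl (fun acc2 j =>
        if PySem.List.pyGetD arr i 0 == PySem.List.pyGetD arr j 0 then
          acc2 ++ [PySem.List.pyGetD arr i 0]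
        else acc2) acc)
    (fun acc i => acc ++
      ((PySem.List.pyRange (i + 1) (arr.length : Int) 1).filter
        (fun j => PySem.List.pyGetD arr i 0 == PySem.List.pyGetD arr j 0)).map
        (fun _ => PySem.List.pyGetD arr i 0))
    ([] : List Int)
    (fun i _ acc => PySem.List.foldl_append_if _ _ _ _)
  rw [h1, PySem.List.foldl_append_eq_flatMap]
  simp only [List.nil_append, List.mem_flatMap, List.mem_map, List.mem_filter,
    PySem.List.mem_pyRange_one]
  constructor
  · rintro ⟨i, ⟨hi0, hin⟩, j, ⟨⟨hj1, hjn⟩, he⟩, hy⟩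
    have hgi : PySem.List.pyGetD arr i 0 = arr[i.toNat]'(by omega) :=
      PySem.List.pyGetD_eq_getElem _ _ hi0 hin
    have hgj : PySem.List.pyGetD arr j 0 = arr[j.toNat]'(by omega) :=
      PySem.List.pyGetD_eq_getElem _ _ (by omega) hjn
    have he' : arr[i.toNat]'(by omega) = arr[j.toNat]'(by omega) := by
      rw [← hgi, ← hgj]; simpa using he
    have := two_le_count_of_indices arr i.toNat j.toNat (by omega) (by omega) he'
    rw [← hy, hgi]
    exact this
  · intro hc
    obtain ⟨i, j, hij, hjl, hgi, hgj⟩ := indices_of_two_le_count arr x hc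
    have hil : i < arr.length := by omega
    have hiI : ((i : Int)) < (arr.length : Int) := by exact_mod_cast hil
    have hjI : ((j : Int)) < (arr.length : Int) := by exact_mod_cast hjl
    have h1 : PySem.List.pyGetD arr (i : Int) 0 = arr[i]'hil := by
      rw [PySem.List.pyGetD_eq_getElem _ _ (by omega) hiI]; simp
    have h2 : PySem.List.pyGetD arr (j : Int) 0 = arr[j]'hjl := by
      rw [PySem.List.pyGetD_eq_getElem _ _ (by omega) hjI]; simp
    rw [List.getElem?_eq_getElem hil] at hgi
    rw [List.getElem?_eq_getElem hjl] at hgj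
    have hgi' : arr[i]'hil = x := Option.some_inj.mp hgi
    have hgj' : arr[j]'hjl = x := Option.some_inj.mp hgj
    refine ⟨(i : Int), ⟨by omega, hiI⟩, (j : Int),
      ⟨⟨by exact_mod_cast hij, hjI⟩, by simp [h1, h2, hgi', hgj']⟩, by rw [h1, hgi']⟩

-- B's scan on a sorted list finds the minimum value occurring at least twice
theorem find_adj_spec (s : List Int) (hs : s.Pairwise (· ≤ ·)) (x : Int) (hx : 2 ≤ s.count x) :
    ∃ m, (s.zip s.tail).find? (fun p => p.1 == p.2) = some (m, m) ∧
      2 ≤ s.count m ∧ ∀ y, 2 ≤ s.count y → m ≤ y := by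
  induction s with
  | nil => simp at hx
  | cons a s ih =>
    match s with
    | [] =>
      have h1 : List.count x [a] ≤ 1 := by simp [List.count_singleton]; split <;> omega
      omega
    | b :: t =>
      have hle : ∀ z ∈ b :: t, a ≤ z := fun z hz => (List.pairwise_cons.mp hs).1 z hz
      by_cases hab : a = b
      · subst hab
        refine ⟨a, by simp, by simp, ?_⟩
        intro y hy
        have hym : y ∈ a :: a :: t := List.count_pos_iff.mp (by omega)
        rcases List.mem_cons.mp hym with h | hym
        · exact h ▸ le_refl _
        · exact hle y hym
      · have hanb : a ∉ b :: t := by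
          intro hmem
          have h1 : a ≤ b := hle b (by simp)
          have h2 : b ≤ a := by
            rcases List.mem_cons.mp hmem with h | hm
            · exact h.ge
            · exact (List.pairwise_cons.mp (List.pairwise_cons.mp hs).2).1 a hm
          exact hab (le_antisymm h1 h2)
        have hca : (b :: t).count a = 0 := List.count_eq_zero_of_not_mem hanb
        have hxa : ¬ (a = x) := by
          intro h; subst h; simp [List.count_cons_self, hca] at hx
        have hx' : 2 ≤ (b :: t).count x := by
          rw [List.count_cons] at hx; simp [hxa] at hx; omega
        obtain ⟨m, hfind, hcnt, hmin⟩ := ih (List.pairwise_cons.mp hs).2 hx'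
        refine ⟨m, ?_, by rw [List.count_cons]; omega, ?_⟩
        · simpa [List.find?_cons, hab] using hfind
        · intro y hy
          have hya : ¬ (a = y) := by
            intro h; subst h; simp [List.count_cons_self, hca] at hy
          apply hmin
          rw [List.count_cons] at hy; simp [hya] at hy; omega

-- ===== VERDICT (by name: the statement is the Claim_ definition above) =====
theorem migrationofbirds_spec : Claim_equal_migrationofbirds := by
  intro arr _ hPre
  unfold Spec_migrationofbirds migrationofbirds migrationofbirds_alt
  dsimp only
  set stb := (PySem.List.pyRange 0 (arr.length : Int) 1).foldl (fun acc i =>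
      (PySem.List.pyRange (i + 1) (arr.length : Int) 1).foldl (fun acc2 j =>
        if PySem.List.pyGetD arr i 0 == PySem.List.pyGetD arr j 0 then
          acc2 ++ [PySem.List.pyGetD arr i 0]
        else acc2) acc) ([] : List Int) with hstb
  -- a repeated value exists
  obtain ⟨x, hxdup⟩ := List.exists_duplicate_iff_not_nodup.mpr hPre
  have hxc : 2 ≤ arr.count x := List.duplicate_iff_two_le_count.mp hxdup
  -- B's side: the sorted copy
  set s := PySem.List.sorted arr (fun x => x) false with hs
  have hperm : s.Perm arr := PySem.List.sorted_perm arr _ _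
  have hpw : s.Pairwise (· ≤ ·) := PySem.List.sorted_pairwise arr (fun x => x)
  have hxs : 2 ≤ s.count x := by rw [hperm.count_eq]; exact hxc
  obtain ⟨m, hfind, hcntm, hminm⟩ := find_adj_spec s hpw x hxs
  -- A's side: min? of the collected duplicates
  have hmemm : m ∈ stb := (mem_stb_iff arr m).mpr (by rw [← hperm.count_eq]; exact hcntm)
  obtain ⟨mA, hmA⟩ : ∃ mA, PySem.List.min? stb (fun x => x) = some mA := by
    cases hmin : PySem.List.min? stb (fun x : Int => x) with
    | some mA => exact ⟨mA, rfl⟩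
    | none =>
      rw [PySem.List.min?_eq_none_iff] at hmin
      rw [hmin] at hmemm; simp at hmemm
  have hmAmem : mA ∈ stb := PySem.List.min?_mem hmA
  have hmAmin := PySem.List.min?_isMin hmA
  have hmAc : 2 ≤ arr.count mA := (mem_stb_iff arr mA).mp hmAmem
  have h1 : mA ≤ m := hmAmin m hmemm
  have h2 : m ≤ mA := hminm mA (by rw [hperm.count_eq]; exact hmAc)
  rw [hmA, hfind]
  simp only [Option.getD_some]
  omega
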